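-- pv_equiv track=rewrite | github.com/yojiyama7/python_competitive_programming | atcoder/_old/some/e_digit_sum.py | digit_sum_simple
-- ===== SOURCE A (Python) =====
-- def digit_sum_simple(n):
--
--     max_sum = -1
--
--     for i in range(10**(len(str(n))-1)-1, n+1):
--
--         i_parts = []
--         for i_part in str(i):
--             i_parts.append(int(i_part))
--
--         this_sum = sum(i_parts)
--
--         if max_sum < this_sum:
--             max_sum = this_sum
--             max_sum_i = i
--
--     return max_sum, max_sum_i
-- ===== SOURCE B (Python) =====
-- def digit_sum_simple(n):
--     # Candidate-based: the best value in [10**(d-1)-1, n] is n itself or some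
--     # "prefix-1 followed by all 9s" number; scan the O(d) candidates only.
--     def dsum(m):
--         s = 0
--         while m > 0:
--             s += m % 10
--             m //= 10
--         return s
--     best_sum, best_i = dsum(n), n
--     k = 1
--     while 10 ** k <= n:
--         p = 10 ** k
--         c = (n // p) * p - 1
--         cs = dsum(c)
--         if cs > best_sum or (cs == best_sum and c < best_i):
--             best_sum, best_i = cs, c
--         k += 1
--     return best_sum, best_i
-- ===== Notes on version B (the rewrite author's own statement) =====
-- stated objective: faster
-- what changed: Instead of scanning every integer in [10**(d-1)-1, n] and summing its decimal string's digits, B evaluates only the O(d) candidates (n itself and each 'prefix minus one followed by all nines' number) with an arithmetic divmod digit sum, picking the max sum with ties broken by smallest number.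
import Mathlib
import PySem

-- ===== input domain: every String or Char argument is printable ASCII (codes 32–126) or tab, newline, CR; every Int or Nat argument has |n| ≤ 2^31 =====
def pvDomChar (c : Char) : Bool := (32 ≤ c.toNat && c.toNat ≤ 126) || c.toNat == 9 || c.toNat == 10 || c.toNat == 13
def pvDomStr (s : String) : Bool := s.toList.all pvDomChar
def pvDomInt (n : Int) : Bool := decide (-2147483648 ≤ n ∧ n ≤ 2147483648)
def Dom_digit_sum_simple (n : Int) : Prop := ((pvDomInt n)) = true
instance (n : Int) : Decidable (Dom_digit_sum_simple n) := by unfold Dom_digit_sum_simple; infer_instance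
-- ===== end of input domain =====

-- B replaces A's scan of every integer in [10^(d-1)-1, n] by the O(d) candidates
-- "n" and "prefix-of-n minus one followed by all nines", with an arithmetic digit sum
-- (objective: faster).

-- ===== PORT A =====
-- int(ch) for a single character ch; exact on the digit characters of str(i), i ≥ 0,
-- which are the only arguments A's int() receives under Pre_.
def pyIntChar (c : Char) : Int := (PySem.Int.ofStr? (String.ofList [c])).getD 0

-- literal port of A: max_sum starts at -1; Python's max_sum_i is unbound until the first
-- iteration (Pre_ guarantees the loop body runs), ported as initial second component 0,
-- overwritten at the first iteration since -1 < any digit sum. len(str n) ≥ 1 always,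
-- so the Nat subtraction in the exponent is Python-exact.
def digit_sum_simple (n : Int) : Int × Int :=
  let start : Int := 10 ^ ((PySem.Int.toChars n).length - 1) - 1
  (PySem.List.pyRange start (n + 1) 1).foldl
    (fun st i =>
      let i_parts := (PySem.Int.toChars i).foldl (fun acc c => acc ++ [pyIntChar c]) ([] : List Int)
      let this_sum := i_parts.sum
      if st.1 < this_sum then (this_sum, i) else st)
    (-1, 0)

-- ===== PORT B =====
-- dsum's "while m > 0" loop over Nat; for m ≤ 0 Python's loop body never runs, matched by toNat
def altDSumNat (m : Nat) : Nat :=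
  if _h : m = 0 then 0 else m % 10 + altDSumNat (m / 10)
  decreasing_by exact Nat.div_lt_self (Nat.pos_of_ne_zero _h) (by norm_num)

def altDSum (m : Int) : Int := (altDSumNat m.toNat : Int)

-- the "while 10**k <= n" candidate loop of Source B
def altLoop (n : Int) (k : Nat) (st : Int × Int) : Int × Int :=
  if h : (10 : Int) ^ k ≤ n then
    let p : Int := 10 ^ k
    let c : Int := PySem.Int.floordiv n p * p - 1
    let cs : Int := altDSum c
    altLoop n (k + 1) (if cs > st.1 ∨ (cs = st.1 ∧ c < st.2) then (cs, c) else st)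
  else st
  termination_by (n.toNat + 1) - 10 ^ k
  decreasing_by
    have h1 : (10 : Nat) ^ k < 10 ^ (k + 1) :=
      Nat.pow_lt_pow_right (by norm_num) (Nat.lt_succ_self k)
    have h2 : ((10 : Nat) ^ k : Int) ≤ n := by push_cast; exact_mod_cast h
    have h3 : (10 : Nat) ^ k ≤ n.toNat := by omega
    omega

def digit_sum_simple_alt (n : Int) : Int × Int := altLoop n 1 (altDSum n, n)

-- ===== PRECONDITION & SPEC =====
-- For negative n the Python loop body never runs and A raises UnboundLocalError at the return.
def Pre_digit_sum_simple (n : Int) : Prop := 0 ≤ n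
instance (n : Int) : Decidable (Pre_digit_sum_simple n) := by unfold Pre_digit_sum_simple; infer_instance
def pvWitness_digit_sum_simple : Int := 42

def Spec_digit_sum_simple (n : Int) (out : Int × Int) : Prop := out = digit_sum_simple_alt n
instance (n : Int) (out : Int × Int) : Decidable (Spec_digit_sum_simple n out) := by unfold Spec_digit_sum_simple; infer_instance

-- ===== CLAIM (what is proved, stated in full; the proofs are below) =====
def Claim_equal_digit_sum_simple : Prop := ∀ (n : Int), Dom_digit_sum_simple n → Pre_digit_sum_simple n → Spec_digit_sum_simple n (digit_sum_simple n)

-- ===== LEMMAS AND PROOFS =====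

-- digit sum over Nat.digits, and its Int version
def sdg (N : Nat) : Nat := (Nat.digits 10 N).sum
def fI (x : Int) : Int := (sdg x.toNat : Int)

lemma sdg_def (r : Nat) : sdg r = r % 10 + sdg (r / 10) := by
  rcases Nat.eq_zero_or_pos r with h | h
  · simp [h, sdg]
  · rw [sdg, Nat.digits_def' (by norm_num : 1 < 10) h]; simp [sdg]

lemma sdg_lt10 (r : Nat) (h : r < 10) : sdg r = r := by
  rw [sdg_def, Nat.mod_eq_of_lt h, Nat.div_eq_of_lt h]
  simp [sdg]

lemma altDSumNat_eq (N : Nat) : altDSumNat N = sdg N := by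
  induction N using altDSumNat.induct with
  | case1 => simp [altDSumNat, sdg]
  | case2 m h ih => rw [altDSumNat, dif_neg h, ih, ← sdg_def]

lemma altDSum_eq (x : Int) : altDSum x = fI x := by
  simp [altDSum, fI, altDSumNat_eq]

lemma sdg_split (k a r : Nat) (h : r < 10 ^ k) : sdg (a * 10 ^ k + r) = sdg a + sdg r := by
  induction k generalizing a r with
  | zero => interval_cases r; simp [sdg]
  | succ k ih =>
    have hx10 : (a * 10 ^ (k + 1) + r) % 10 = r % 10 := by
      rw [pow_succ, ← mul_assoc]; omega
    have hxd : (a * 10 ^ (k + 1) + r) / 10 = a * 10 ^ k + r / 10 := by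
      rw [pow_succ, ← mul_assoc]; omega
    rw [sdg_def, hx10, hxd, ih a (r / 10) (by
      have : 10 ^ (k+1) = 10 ^ k * 10 := pow_succ 10 k
      omega), sdg_def r]
    omega

lemma sdg_nines (k : Nat) : sdg (10 ^ k - 1) = 9 * k := by
  induction k with
  | zero => simp [sdg]
  | succ k ih =>
    have h1 : (10:Nat) ^ (k+1) - 1 = 9 * 10 ^ k + (10 ^ k - 1) := by
      have : 10 ^ (k+1) = 10 ^ k * 10 := pow_succ 10 k
      have : (1:Nat) ≤ 10 ^ k := Nat.one_le_pow _ _ (by norm_num)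
      omega
    rw [h1, sdg_split k 9 _ (by have : (1:Nat) ≤ 10 ^ k := Nat.one_le_pow _ _ (by norm_num); omega),
      sdg_lt10 9 (by norm_num)]
    omega

lemma sdg_le_nines (k : Nat) : ∀ r, r < 10 ^ k → sdg r ≤ 9 * k ∧ (sdg r = 9 * k → r = 10 ^ k - 1) := by
  induction k with
  | zero => intro r hr; interval_cases r; simp [sdg]
  | succ k ih =>
    intro r hr
    have hd : r / 10 < 10 ^ k := by
      have : 10 ^ (k+1) = 10 ^ k * 10 := pow_succ 10 k
      omega
    obtain ⟨h1, h2⟩ := ih (r / 10) hd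
    have hm : r % 10 ≤ 9 := by omega
    rw [sdg_def]
    constructor
    · omega
    · intro he
      have hq : sdg (r / 10) = 9 * k := by omega
      have := h2 hq
      have h9 : r % 10 = 9 := by omega
      have : (1:Nat) ≤ 10 ^ k := Nat.one_le_pow _ _ (by norm_num)
      have hp : 10 ^ (k+1) = 10 ^ k * 10 := pow_succ 10 k
      omega

-- ===== string-side facts for port A =====

lemma toDigitsCore_eq : ∀ (f n : Nat) (acc : List Char), n < f →
    Nat.toDigitsCore 10 f n acc =
      (if n = 0 then ['0'] else ((Nat.digits 10 n).map Nat.digitChar).reverse) ++ acc := by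
  intro f
  induction f with
  | zero => omega
  | succ f ih =>
    intro n acc hn
    rw [Nat.toDigitsCore]
    by_cases h0 : n = 0
    · subst h0; simp; rfl
    · by_cases hdiv : n / 10 = 0
      · have hlt : n < 10 := by omega
        simp only [hdiv, if_neg h0]
        rw [Nat.digits_def' (by norm_num : 1 < 10) (Nat.pos_of_ne_zero h0), hdiv]
        simp [Nat.mod_eq_of_lt hlt]
      · simp only [hdiv, if_neg h0]
        rw [ih (n / 10) _ (by omega), if_neg hdiv]
        rw [Nat.digits_def' (by norm_num : 1 < 10) (Nat.pos_of_ne_zero h0)]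
        simp

lemma toChars_nonneg (n : Int) (h : 0 ≤ n) :
    PySem.Int.toChars n =
      if n.toNat = 0 then ['0'] else ((Nat.digits 10 n.toNat).map Nat.digitChar).reverse := by
  rw [PySem.Int.toChars, if_neg (by omega)]
  rw [Nat.toDigits, toDigitsCore_eq _ _ _ (Nat.lt_succ_self _)]
  simp

lemma pyIntChar_digitChar (r : Nat) (h : r < 10) : pyIntChar (Nat.digitChar r) = (r : Int) := by
  interval_cases r <;> decide

lemma partsSum (i : Int) (h : 0 ≤ i) :
    ((PySem.Int.toChars i).foldl (fun acc c => acc ++ [pyIntChar c]) ([] : List Int)).sum = fI i := by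
  rw [PySem.List.foldl_append_singleton_eq_map, List.nil_append, toChars_nonneg i h]
  by_cases h0 : i.toNat = 0
  · rw [if_pos h0]
    have : pyIntChar '0' = 0 := by decide
    simp [this, fI, h0, sdg]
  · rw [if_neg h0, List.map_reverse, List.sum_reverse, List.map_map]
    have hc : List.map (pyIntChar ∘ Nat.digitChar) (Nat.digits 10 i.toNat)
        = List.map (fun r : Nat => (r : Int)) (Nat.digits 10 i.toNat) :=
      List.map_congr_left (fun r hr => pyIntChar_digitChar r (Nat.digits_lt_base (by norm_num) hr))
    rw [hc, fI, sdg, Nat.cast_list_sum]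


-- ===== invariants =====

lemma fI_nonneg (x : Int) : 0 ≤ fI x := Int.natCast_nonneg _

def updA (st : Int × Int) (i : Int) : Int × Int :=
  if st.1 < fI i then (fI i, i) else st

def GoodA (st : Int × Int) (lo hi : Int) : Prop :=
  lo ≤ st.2 ∧ st.2 ≤ hi ∧ fI st.2 = st.1 ∧
    ∀ x : Int, lo ≤ x → x ≤ hi → fI x ≤ st.1 ∧ (x < st.2 → fI x < st.1)

lemma foldA_interval (t : Nat) (lo : Int) :
    GoodA (List.foldl updA (fI lo, lo) (PySem.List.pyRange (lo + 1) (lo + 1 + t) 1)) lo (lo + t) := by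
  induction t with
  | zero =>
    have he : PySem.List.pyRange (lo + 1) (lo + 1 + 0) 1 = [] := by
      rw [PySem.List.pyRange_of_pos _ _ (by norm_num : (0:Int) < 1)]
      simp
    push_cast
    rw [show lo + 1 + (0:Int) = lo + 1 + ((0:Nat):Int) by norm_num] at he
    push_cast at he
    rw [he]
    simp only [List.foldl_nil]
    refine ⟨by omega, by omega, rfl, ?_⟩
    intro x hx1 hx2
    have : x = lo := by omega
    subst this
    exact ⟨le_refl _, by omega⟩
  | succ t ih =>
    have hstep : PySem.List.pyRange (lo + 1) (lo + 1 + (t + 1)) 1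
        = PySem.List.pyRange (lo + 1) (lo + 1 + t) 1 ++ [lo + 1 + t] := by
      have h1 : (lo + 1 + ((t : Int) + 1)) = (lo + 1 + t) + 1 := by ring
      rw [h1, PySem.List.pyRange_one_succ_right (by omega : lo + 1 ≤ lo + 1 + (t : Int))]
    push_cast
    push_cast at hstep ih
    rw [hstep, List.foldl_append]
    set st := List.foldl updA (fI lo, lo) (PySem.List.pyRange (lo + 1) (lo + 1 + (t:Int)) 1) with hst
    obtain ⟨h1, h2, h3, h4⟩ := ih
    set x0 : Int := lo + 1 + t with hx0
    simp only [List.foldl_cons, List.foldl_nil]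
    by_cases hc : st.1 < fI x0
    · rw [updA, if_pos hc]
      refine ⟨by omega, by omega, rfl, ?_⟩
      intro x hxl hxh
      constructor
      · rcases lt_or_ge x x0 with hx | hx
        · exact le_of_lt (lt_of_le_of_lt ((h4 x hxl (by omega)).1) hc)
        · have : x = x0 := by omega
          subst this; exact le_refl _
      · intro hlt
        exact lt_of_le_of_lt ((h4 x hxl (by omega)).1) hc
    · rw [updA, if_neg hc]
      refine ⟨h1, by omega, h3, ?_⟩
      intro x hxl hxh
      rcases lt_or_ge x x0 with hx | hx
      · exact h4 x hxl (by omega)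
      · have : x = x0 := by omega
        subst this
        exact ⟨by omega, fun hlt => absurd hlt (by omega)⟩

def GoodB (st : Int × Int) (Q : List Int) : Prop :=
  st.2 ∈ Q ∧ fI st.2 = st.1 ∧ ∀ x ∈ Q, fI x ≤ st.1 ∧ (fI x = st.1 → st.2 ≤ x)

lemma stepB (st : Int × Int) (Q : List Int) (c : Int) (hG : GoodB st Q) :
    GoodB (if fI c > st.1 ∨ (fI c = st.1 ∧ c < st.2) then (fI c, c) else st) (Q ++ [c]) := by
  obtain ⟨h1, h2, h3⟩ := hG
  by_cases hc : fI c > st.1 ∨ (fI c = st.1 ∧ c < st.2)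
  · rw [if_pos hc]
    refine ⟨by simp, rfl, ?_⟩
    intro x hx
    rcases List.mem_append.1 hx with hx | hx
    · obtain ⟨ha, hb⟩ := h3 x hx
      rcases hc with hc | ⟨hc1, hc2⟩
      · exact ⟨by omega, fun he => by omega⟩
      · exact ⟨by omega, fun he => le_trans (le_of_lt hc2) (hb (by omega))⟩
    · simp at hx; subst hx; exact ⟨le_refl _, fun _ => le_refl _⟩
  · rw [if_neg hc]
    push_neg at hc
    obtain ⟨hc1, hc2⟩ := hc
    refine ⟨List.mem_append.2 (Or.inl h1), h2, ?_⟩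
    intro x hx
    rcases List.mem_append.1 hx with hx | hx
    · exact h3 x hx
    · simp at hx; subst hx
      exact ⟨by omega, fun he => hc2 he⟩

def candI (n : Int) (k : Nat) : Int := PySem.Int.floordiv n (10 ^ k) * 10 ^ k - 1

def Qlist (n : Int) (k : Nat) : List Int := n :: (List.range' 1 (k - 1)).map (candI n)


lemma pow_cast_le (n : Int) (k : Nat) (hn : 0 ≤ n) : ((10:Int) ^ k ≤ n) ↔ (10 ^ k ≤ n.toNat) := by
  constructor
  · intro h
    have : ((10:Nat) ^ k : Int) ≤ n := by push_cast; exact h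
    omega
  · intro h
    have : ((10:Nat) ^ k : Int) ≤ (n.toNat : Int) := by exact_mod_cast h
    push_cast at this
    omega

lemma loopB_inv (n : Int) (hn : 1 ≤ n) (d : Nat) (hd : d = (Nat.digits 10 n.toNat).length) :
    ∀ (j k : Nat) (st : Int × Int), 1 ≤ k → k ≤ d → d - k ≤ j → GoodB st (Qlist n k) →
      GoodB (altLoop n k st) (Qlist n d) := by
  have hN : n.toNat ≠ 0 := by omega
  have hlen : d = Nat.log 10 n.toNat + 1 := by rw [hd, Nat.length_digits 10 _ (by norm_num) hN]
  have hhigh : n.toNat < 10 ^ d := by rw [hlen]; exact Nat.lt_pow_succ_log_self (by norm_num) _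
  intro j
  induction j with
  | zero =>
    intro k st hk1 hk2 hj hG
    have hkd : k = d := by omega
    subst hkd
    rw [altLoop, dif_neg (by rw [pow_cast_le n k (by omega)]; omega)]
    exact hG
  | succ j ih =>
    intro k st hk1 hk2 hj hG
    by_cases hle : (10 : Int) ^ k ≤ n
    · rw [altLoop, dif_pos hle]
      have hkd : k + 1 ≤ d := by
        have : 10 ^ k ≤ n.toNat := (pow_cast_le n k (by omega)).1 hle
        have : k ≤ Nat.log 10 n.toNat := (Nat.pow_le_iff_le_log (by norm_num) hN).1 this
        omega
      have hQ : Qlist n (k + 1) = Qlist n k ++ [candI n k] := by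
        rw [Qlist, Qlist]
        have h1 : k + 1 - 1 = (k - 1) + 1 := by omega
        rw [h1, List.range'_concat]
        simp only [List.map_append, List.map_cons, List.map_nil, List.cons_append]
        have h2 : 1 + 1 * (k - 1) = k := by omega
        rw [h2]
      refine ih (k + 1) _ (by omega) hkd (by omega) ?_
      rw [hQ]
      simp only [altDSum_eq]
      exact stepB st (Qlist n k) (candI n k) hG
    · rw [altLoop, dif_neg hle]
      have : ¬ (10 ^ k ≤ n.toNat) := fun hcon => hle ((pow_cast_le n k (by omega)).2 hcon)
      have hkd : d ≤ k := by
        rcases Nat.lt_or_ge (Nat.log 10 n.toNat) k with h | h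
        · omega
        · exact absurd ((Nat.pow_le_iff_le_log (by norm_num) hN).2 h) this
      have : k = d := by omega
      subst this
      exact hG


-- ===== the candidate domination lemma (Nat) =====

lemma dominate (N m : Nat) (hm : m ≤ N) :
    (sdg m < sdg N ∨ m = N) ∨
      ∃ k, 1 ≤ k ∧ 10 ^ k ≤ N ∧ m ≤ N / 10 ^ k * 10 ^ k - 1 ∧
        sdg m ≤ sdg (N / 10 ^ k * 10 ^ k - 1) ∧
        (sdg m = sdg (N / 10 ^ k * 10 ^ k - 1) → m = N / 10 ^ k * 10 ^ k - 1) := by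
  rcases eq_or_lt_of_le hm with he | hlt
  · exact Or.inl (Or.inr he)
  set P : Nat → Prop := fun j => m / 10 ^ j < N / 10 ^ j with hP
  have hP0 : P 0 := by simpa [hP] using hlt
  have hPN : ¬ P N := by
    have h10 : N < 10 ^ N := Nat.lt_pow_self (by norm_num)
    have hd : N / 10 ^ N = 0 := Nat.div_eq_of_lt h10
    have hdm : m / 10 ^ N = 0 := Nat.div_eq_of_lt (by omega)
    simp [hP, hd, hdm]
  have hex : ∃ k, P k ∧ ¬ P (k + 1) := by
    have hPk : P (Nat.findGreatest P N) := Nat.findGreatest_spec (Nat.zero_le N) hP0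
    refine ⟨Nat.findGreatest P N, hPk, ?_⟩
    have hleN : Nat.findGreatest P N ≤ N := Nat.findGreatest_le N
    rcases eq_or_lt_of_le hleN with h | h
    · exact absurd (h ▸ hPk) hPN
    · exact Nat.findGreatest_is_greatest (k := Nat.findGreatest P N + 1) (Nat.lt_succ_self _) (by omega)
  obtain ⟨k, hPk, hnPk1⟩ := hex
  have hle1 : m / 10 ^ (k+1) ≤ N / 10 ^ (k+1) := Nat.div_le_div_right hm
  have heq1 : m / 10 ^ (k+1) = N / 10 ^ (k+1) := by
    rcases eq_or_lt_of_le hle1 with h | h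
    · exact h
    · exact absurd h hnPk1
  rcases Nat.eq_zero_or_pos k with hk0 | hk1
  · -- k = 0 : same higher digits, last digit smaller; sdg m < sdg N
    subst hk0
    have hm10 : m / 10 = N / 10 := by simpa using heq1
    have hmod : m % 10 < N % 10 := by
      have h1 := Nat.div_add_mod m 10
      have h2 := Nat.div_add_mod N 10
      omega
    left; left
    rw [sdg_def m, sdg_def N, hm10]
    omega
  · -- k ≥ 1 : the candidate (N / 10^k)*10^k - 1 dominates m
    have hppos : 0 < (10:Nat) ^ k := pow_pos (by norm_num) k
    obtain ⟨q, hq⟩ : ∃ q, N / 10 ^ (k + 1) = q := ⟨_, rfl⟩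
    obtain ⟨aN, haN⟩ : ∃ a, N / 10 ^ k % 10 = a := ⟨_, rfl⟩
    obtain ⟨am, ham⟩ : ∃ a, m / 10 ^ k % 10 = a := ⟨_, rfl⟩
    have hdivdiv : ∀ x : Nat, x / 10 ^ k / 10 = x / 10 ^ (k + 1) := by
      intro x; rw [Nat.div_div_eq_div_mul, ← pow_succ]
    have hsplitN : N / 10 ^ k = q * 10 + aN := by
      have h := Nat.div_add_mod (N / 10 ^ k) 10
      rw [hdivdiv N, hq, haN] at h; omega
    have hsplitm : m / 10 ^ k = q * 10 + am := by
      have h := Nat.div_add_mod (m / 10 ^ k) 10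
      rw [hdivdiv m, heq1, hq, ham] at h; omega
    have hamlt : am < aN := by
      have h : m / 10 ^ k < N / 10 ^ k := hPk
      omega
    have hpk : 10 ^ k ≤ N := by
      have h : 1 ≤ N / 10 ^ k := by omega
      rwa [Nat.one_le_div_iff hppos] at h
    have haN10 : aN < 10 := haN ▸ Nat.mod_lt _ (by norm_num)
    have ham10 : am < 10 := ham ▸ Nat.mod_lt _ (by norm_num)
    -- the candidate rewritten with its final "all nines" block
    have hprod : (q * 10 + (aN - 1)) * 10 ^ k = (q * 10 + aN) * 10 ^ k - 10 ^ k := by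
      have h : q * 10 + (aN - 1) = (q * 10 + aN) - 1 := by omega
      rw [h, Nat.sub_mul, one_mul]
    have hAp : 10 ^ k ≤ (q * 10 + aN) * 10 ^ k := Nat.le_mul_of_pos_left _ (by omega)
    have hc : N / 10 ^ k * 10 ^ k - 1 = (q * 10 + (aN - 1)) * 10 ^ k + (10 ^ k - 1) := by
      rw [hsplitN, hprod]; omega
    have hhead : ∀ a : Nat, a < 10 → sdg (q * 10 + a) = sdg q + a := by
      intro a ha
      have h : q * 10 + a = q * 10 ^ 1 + a := by norm_num
      rw [h, sdg_split 1 q a (by omega), sdg_lt10 a ha]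
    have hsdc : sdg (N / 10 ^ k * 10 ^ k - 1) = sdg q + (aN - 1) + 9 * k := by
      rw [hc, sdg_split k _ _ (by omega), sdg_nines, hhead (aN - 1) (by omega)]
    -- m and its digit sum
    have hmlt : m % 10 ^ k < 10 ^ k := Nat.mod_lt _ hppos
    have hsm : sdg m = sdg q + am + sdg (m % 10 ^ k) := by
      have h1 := sdg_split k (m / 10 ^ k) (m % 10 ^ k) hmlt
      rw [Nat.div_add_mod'] at h1
      rw [h1, hsplitm, hhead am ham10]
    obtain ⟨hmod_le, hmod_eq⟩ := sdg_le_nines k (m % 10 ^ k) hmlt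
    -- m ≤ candidate
    have hmulle : (q * 10 + am) * 10 ^ k ≤ (q * 10 + (aN - 1)) * 10 ^ k :=
      Nat.mul_le_mul_right _ (by omega)
    have hmdecomp : m = (q * 10 + am) * 10 ^ k + m % 10 ^ k := by
      have h := Nat.div_add_mod m (10 ^ k)
      rw [hsplitm] at h
      rw [Nat.mul_comm (10 ^ k) (q * 10 + am)] at h
      omega
    have hmc : m ≤ N / 10 ^ k * 10 ^ k - 1 := by
      rw [hc]; omega
    right
    refine ⟨k, hk1, hpk, hmc, by omega, ?_⟩
    intro heqs
    have h1 : am = aN - 1 ∧ sdg (m % 10 ^ k) = 9 * k := by omega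
    have h2 : m % 10 ^ k = 10 ^ k - 1 := hmod_eq h1.2
    rw [hc, hmdecomp, h1.1, h2]

-- ===== assembling =====

lemma len_facts (N : Nat) (h : N ≠ 0) :
    1 ≤ (Nat.digits 10 N).length ∧ 10 ^ ((Nat.digits 10 N).length - 1) ≤ N ∧
      N < 10 ^ (Nat.digits 10 N).length ∧ ∀ k, (10 ^ k ≤ N ↔ k ≤ (Nat.digits 10 N).length - 1) := by
  rw [Nat.length_digits 10 N (by norm_num) h]
  refine ⟨by omega, ?_, ?_, ?_⟩
  · simpa using Nat.pow_log_le_self 10 h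
  · simpa using Nat.lt_pow_succ_log_self (by norm_num) N
  · intro k; simpa using Nat.pow_le_iff_le_log (by norm_num) (x := k) h

lemma A_good (n : Int) (hn : 1 ≤ n) :
    GoodA (digit_sum_simple n) ((10 : Int) ^ ((Nat.digits 10 n.toNat).length - 1) - 1) n := by
  obtain ⟨N, rfl⟩ : ∃ N : Nat, n = (N : Int) := ⟨n.toNat, (Int.toNat_of_nonneg (by omega)).symm⟩
  have hN : (N : Int).toNat = N := Int.toNat_natCast N
  rw [hN]
  have hN0 : N ≠ 0 := by omega
  obtain ⟨hd1, hlow, hhigh, hiff⟩ := len_facts N hN0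
  have hlenchars : (PySem.Int.toChars (N : Int)).length = (Nat.digits 10 N).length := by
    rw [toChars_nonneg _ (by omega), hN, if_neg hN0]
    simp
  have hpowcast : ((10 : Int)) ^ ((Nat.digits 10 N).length - 1)
      = ((10 ^ ((Nat.digits 10 N).length - 1) : Nat) : Int) := by push_cast; rfl
  have hstart_le : (10 : Int) ^ ((Nat.digits 10 N).length - 1) - 1 ≤ (N : Int) := by
    rw [hpowcast]
    have h2 : ((10 ^ ((Nat.digits 10 N).length - 1) : Nat) : Int) ≤ (N : Int) := by
      exact_mod_cast hlow
    omega
  have hstart_pos : (1 : Int) ≤ (10 : Int) ^ ((Nat.digits 10 N).length - 1) := by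
    rw [hpowcast]
    have : (1 : Nat) ≤ 10 ^ ((Nat.digits 10 N).length - 1) := Nat.one_le_pow _ _ (by norm_num)
    exact_mod_cast this
  set start : Int := (10 : Int) ^ ((Nat.digits 10 N).length - 1) - 1 with hstart
  unfold digit_sum_simple
  simp only [hlenchars]
  rw [← hstart]
  -- replace the string-based loop body by updA on the range (all elements are ≥ 0)
  rw [PySem.List.foldl_congr_mem _ _ updA _ (by
    intro acc x hx
    have hx0 : 0 ≤ x := by
      have := (PySem.List.mem_pyRange_one).1 hx
      omega
    simp only [partsSum x hx0, updA])]
  -- peel off the first iteration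
  rw [PySem.List.pyRange_one_cons (by omega : start < (N : Int) + 1)]
  simp only [List.foldl_cons]
  have hfirst : updA (-1, 0) start = (fI start, start) := by
    rw [updA, if_pos (by have := fI_nonneg start; omega)]
  rw [hfirst]
  obtain ⟨t, ht⟩ : ∃ t : Nat, (N : Int) - start = (t : Nat) :=
    ⟨((N : Int) - start).toNat, (Int.toNat_of_nonneg (by omega)).symm⟩
  have h1 : (N : Int) + 1 = start + 1 + (t : Int) := by omega
  have h2 : (N : Int) = start + (t : Int) := by omega
  rw [h1, h2]
  exact foldA_interval t start

lemma B_good (n : Int) (hn : 1 ≤ n) :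
    GoodB (digit_sum_simple_alt n) (Qlist n (Nat.digits 10 n.toNat).length) := by
  have hN0 : n.toNat ≠ 0 := by omega
  obtain ⟨hd1, _, _, _⟩ := len_facts n.toNat hN0
  rw [digit_sum_simple_alt]
  refine loopB_inv n hn _ rfl ((Nat.digits 10 n.toNat).length - 1) 1 _ (by omega) hd1 (by omega) ?_
  have hQ1 : Qlist n 1 = [n] := by simp [Qlist]
  rw [hQ1]
  refine ⟨List.mem_singleton_self n, (altDSum_eq n).symm, ?_⟩
  intro x hx
  rw [List.mem_singleton] at hx
  rw [hx]
  exact ⟨le_of_eq (altDSum_eq n).symm, fun _ => le_refl _⟩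

lemma candI_cast (N : Nat) (k : Nat) (hk : 10 ^ k ≤ N) :
    candI (N : Int) k = ((N / 10 ^ k * 10 ^ k - 1 : Nat) : Int) := by
  have hppos : 0 < (10 : Nat) ^ k := pow_pos (by norm_num) k
  have h1 : (1 : Nat) ≤ N / 10 ^ k := (Nat.one_le_div_iff hppos).2 hk
  have h2 : (10 : Nat) ^ k ≤ N / 10 ^ k * 10 ^ k := by
    calc (10:Nat) ^ k = 1 * 10 ^ k := (one_mul _).symm
    _ ≤ N / 10 ^ k * 10 ^ k := Nat.mul_le_mul_right _ h1
  rw [candI]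
  have hpow : ((10 : Int)) ^ k = ((10 ^ k : Nat) : Int) := by push_cast; rfl
  rw [hpow, PySem.Int.floordiv_natCast]
  have : ((N / 10 ^ k : Nat) : Int) * ((10 ^ k : Nat) : Int) = ((N / 10 ^ k * 10 ^ k : Nat) : Int) := by
    push_cast; ring
  rw [this]
  omega

lemma Qlist_mem (n : Int) (d : Nat) (x : Int) :
    x ∈ Qlist n d ↔ x = n ∨ ∃ k, 1 ≤ k ∧ k ≤ d - 1 ∧ x = candI n k := by
  simp only [Qlist, List.mem_cons, List.mem_map, List.mem_range'_1]
  constructor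
  · rintro (h | ⟨k, ⟨hk1, hk2⟩, rfl⟩)
    · exact Or.inl h
    · exact Or.inr ⟨k, hk1, by omega, rfl⟩
  · rintro (h | ⟨k, hk1, hk2, rfl⟩)
    · exact Or.inl h
    · exact Or.inr ⟨k, ⟨hk1, by omega⟩, rfl⟩

theorem main_pos (n : Int) (hn : 1 ≤ n) : digit_sum_simple n = digit_sum_simple_alt n := by
  obtain ⟨N, rfl⟩ : ∃ N : Nat, n = (N : Int) := ⟨n.toNat, (Int.toNat_of_nonneg (by omega)).symm⟩
  have hNN : ((N : Int)).toNat = N := Int.toNat_natCast N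
  have hN0 : N ≠ 0 := by omega
  obtain ⟨hd1, hlow, hhigh, hiff⟩ := len_facts N hN0
  set d := (Nat.digits 10 N).length with hd
  set start : Int := (10 : Int) ^ (d - 1) - 1 with hstart
  have hpowcast : ((10 : Int)) ^ (d - 1) = ((10 ^ (d - 1) : Nat) : Int) := by push_cast; rfl
  have hstart_le : start ≤ (N : Int) := by
    rw [hstart, hpowcast]
    have h2 : ((10 ^ (d - 1) : Nat) : Int) ≤ (N : Int) := by exact_mod_cast hlow
    omega
  have hstart_pos : (0 : Int) ≤ start := by
    rw [hstart, hpowcast]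
    have : (1 : Nat) ≤ 10 ^ (d - 1) := Nat.one_le_pow _ _ (by norm_num)
    omega
  have hA : GoodA (digit_sum_simple (N : Int)) start ((N : Int)) := by
    have := A_good (N : Int) hn
    rwa [hNN, ← hd, ← hstart] at this
  have hB : GoodB (digit_sum_simple_alt (N : Int)) (Qlist (N : Int) d) := by
    have := B_good (N : Int) hn
    rwa [hNN, ← hd] at this
  -- every candidate lies in the scanned interval
  have hQbound : ∀ x ∈ Qlist (N : Int) d, start ≤ x ∧ x ≤ (N : Int) := by
    intro x hx
    rcases (Qlist_mem _ _ _).1 hx with rfl | ⟨k, hk1, hk2, rfl⟩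
    · exact ⟨hstart_le, le_refl _⟩
    · have hkN : 10 ^ k ≤ N := (hiff k).2 hk2
      rw [candI_cast N k hkN]
      have hub : N / 10 ^ k * 10 ^ k ≤ N := Nat.div_mul_le_self N _
      have hlb : 10 ^ (d - 1) ≤ N / 10 ^ k * 10 ^ k := by
        have hdd : 10 ^ (d - 1) / 10 ^ k = 10 ^ (d - 1 - k) := Nat.pow_div hk2 (by norm_num)
        have hq : 10 ^ (d - 1 - k) ≤ N / 10 ^ k := by
          rw [← hdd]; exact Nat.div_le_div_right hlow
        calc 10 ^ (d - 1) = 10 ^ (d - 1 - k) * 10 ^ k := by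
              rw [← pow_add]; congr 1; omega
        _ ≤ N / 10 ^ k * 10 ^ k := Nat.mul_le_mul_right _ hq
      rw [hstart, hpowcast]
      have hlbI : ((10 ^ (d - 1) : Nat) : Int) ≤ ((N / 10 ^ k * 10 ^ k : Nat) : Int) := by
        exact_mod_cast hlb
      have hubI : ((N / 10 ^ k * 10 ^ k : Nat) : Int) ≤ (N : Int) := by exact_mod_cast hub
      constructor <;> omega
  -- candidate domination, transported to Int
  have hdom : ∀ x : Int, start ≤ x → x ≤ (N : Int) →
      ∃ c ∈ Qlist (N : Int) d, x ≤ c ∧ fI x ≤ fI c ∧ (fI x = fI c → x = c) := by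
    intro x hx1 hx2
    obtain ⟨M, rfl⟩ : ∃ M : Nat, x = (M : Int) := ⟨x.toNat, (Int.toNat_of_nonneg (by omega)).symm⟩
    have hMN : M ≤ N := by exact_mod_cast hx2
    have hfix : ∀ y : Nat, fI (y : Int) = ((sdg y : Nat) : Int) := by
      intro y; rw [fI, Int.toNat_natCast]
    rcases dominate N M hMN with (hlt | rfl) | ⟨k, hk1, hkN, hmle, hsle, hseq⟩
    · refine ⟨(N : Int), (Qlist_mem _ _ _).2 (Or.inl rfl), by exact_mod_cast hMN, ?_, ?_⟩
      · rw [hfix, hfix]; exact_mod_cast le_of_lt hlt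
      · intro h; rw [hfix, hfix] at h
        have : sdg M = sdg N := by exact_mod_cast h
        omega
    · exact ⟨(M : Int), (Qlist_mem _ _ _).2 (Or.inl rfl), le_refl _, le_refl _, fun _ => rfl⟩
    · have hkd : k ≤ d - 1 := (hiff k).1 hkN
      refine ⟨candI (N : Int) k, (Qlist_mem _ _ _).2 (Or.inr ⟨k, hk1, hkd, rfl⟩), ?_, ?_, ?_⟩
      · rw [candI_cast N k hkN]; exact_mod_cast hmle
      · rw [candI_cast N k hkN, hfix, hfix]; exact_mod_cast hsle
      · rw [candI_cast N k hkN, hfix, hfix]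
        intro h
        have : sdg M = sdg (N / 10 ^ k * 10 ^ k - 1) := by exact_mod_cast h
        exact_mod_cast hseq this
  -- combine the two characterizations
  obtain ⟨a1, a2, a3, a4⟩ := hA
  obtain ⟨b1, b2, b3⟩ := hB
  obtain ⟨hb1, hb2⟩ := hQbound _ b1
  have hle1 : (digit_sum_simple_alt (N : Int)).1 ≤ (digit_sum_simple (N : Int)).1 := by
    have := (a4 _ hb1 hb2).1
    omega
  obtain ⟨c, hcQ, hxc, hfle, hfeq⟩ := hdom _ a1 a2
  have hcS : fI c ≤ (digit_sum_simple_alt (N : Int)).1 := (b3 c hcQ).1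
  have hle2 : (digit_sum_simple (N : Int)).1 ≤ (digit_sum_simple_alt (N : Int)).1 := by omega
  have hSS : (digit_sum_simple (N : Int)).1 = (digit_sum_simple_alt (N : Int)).1 := le_antisymm hle2 hle1
  have hfc : fI (digit_sum_simple (N : Int)).2 = fI c := by omega
  have hmc : (digit_sum_simple (N : Int)).2 = c := hfeq hfc
  have hv1 : (digit_sum_simple_alt (N : Int)).2 ≤ (digit_sum_simple (N : Int)).2 := by
    have := (b3 _ (hmc ▸ hcQ)).2 (by omega)
    omega
  have hv2 : (digit_sum_simple (N : Int)).2 ≤ (digit_sum_simple_alt (N : Int)).2 := by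
    by_contra hcon
    have hlt : (digit_sum_simple_alt (N : Int)).2 < (digit_sum_simple (N : Int)).2 := by omega
    have := (a4 _ hb1 hb2).2 hlt
    omega
  exact Prod.ext (by omega) (by omega)

-- ===== VERDICT (by name: the statement is the Claim_ definition above) =====
theorem digit_sum_simple_spec : Claim_equal_digit_sum_simple := by
  intro n _ hpre
  unfold Spec_digit_sum_simple
  rcases eq_or_lt_of_le hpre with h0 | h1
  · rw [← h0]
    have hB : digit_sum_simple_alt 0 = (0, 0) := by
      have h0 : altDSum 0 = 0 := by rw [altDSum_eq]; decide
      rw [digit_sum_simple_alt, altLoop, dif_neg (by decide), h0]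
    have hA : digit_sum_simple 0 = (0, 0) := by decide
    rw [hA, hB]
  · exact main_pos n h1
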